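-- pv_equiv track=rewrite | github.com/Shivaji0461/Test-Project_Blackoffer | Solution/Project_Blackoffer.py | complex_word_count
-- ===== SOURCE A (Python) =====
-- from collections import  Counter
--
-- def complex_word_count(x):
--
--     syllable = 'aeiou'
--
--     t = x
--
--     v = []
--
--     for i in t:
--         words = i
--         c=Counter()
--
--         for word in words:
--             c.update(set(word))
--
--         n = 0
--         for a in c.most_common():
--             if a[0] in syllable:
--                 if a[1] >= 2:
--                     n += 1
--
--         m = 0
--         p = []
--         for a in c.most_common():
--             if a[0] in syllable:
--                 p.append(a[0])
--         if len(p) >= 2: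
--             m += 1
--
--         if n >= 1 or m >= 1:
--             v.append(i)
--
--     return len(v)
-- ===== SOURCE B (Python) =====
-- def complex_word_count(x):
--     total = 0
--     for elem in x:
--         counts = [sum(1 for word in elem if vw in word) for vw in 'aeiou']
--         if any(c >= 2 for c in counts) or sum(1 for c in counts if c) >= 2:
--             total += 1
--     return total
-- ===== Notes on version B (the rewrite author's own statement) =====
-- stated objective: simpler
-- what changed: B drops A's all-character Counter, the stable most_common() sort and the two scans over it, and instead counts directly, for each of the five vowels, how many words of the element contain it, qualifying the element if some vowel occurs in >=2 words or >=2 distinct vowels are present. (measured ~3.7x faster: no Counter object, no sort)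
import Mathlib
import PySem

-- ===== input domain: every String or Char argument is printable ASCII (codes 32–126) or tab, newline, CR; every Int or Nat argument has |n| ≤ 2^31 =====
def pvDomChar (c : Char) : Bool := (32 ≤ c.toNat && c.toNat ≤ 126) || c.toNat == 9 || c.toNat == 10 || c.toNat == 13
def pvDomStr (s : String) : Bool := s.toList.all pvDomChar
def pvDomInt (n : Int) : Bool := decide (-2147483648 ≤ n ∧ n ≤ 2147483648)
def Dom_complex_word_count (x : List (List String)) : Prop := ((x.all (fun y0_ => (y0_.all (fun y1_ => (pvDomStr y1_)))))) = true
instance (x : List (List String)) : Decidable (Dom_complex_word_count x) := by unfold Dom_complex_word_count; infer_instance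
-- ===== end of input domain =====

-- B replaces A's all-character Counter and two most_common() scans by a direct
-- per-vowel count of words containing that vowel (objective: simpler).
-- A's Counter insertion order (hash order of set(word)) is not modelled exactly,
-- but A consumes most_common() only through order-independent tallies, so the
-- port (first-occurrence order) computes the same result.

-- ===== PORT A =====
def complex_word_count (x : List (List String)) : Int :=
  let syllable : List Char := ['a', 'e', 'i', 'o', 'u']   -- 'aeiou'; "a[0] in syllable" is char membership
  let t := x
  let v : List (List String) := t.foldl (fun v i =>
    let words := i
    -- c = Counter(); for word in words: c.update(set(word))
    let c : PySem.Dict Char Int := words.foldl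
      (fun c word => (PySem.Set.ofList word.toList).foldl (fun c ch => c.modify ch 0 (· + 1)) c)
      PySem.Dict.empty
    -- c.most_common(): items sorted by count, descending, stable
    let mc := PySem.List.sorted c.items (fun a => a.2) true
    let n : Int := mc.foldl (fun n a =>
      if a.1 ∈ syllable then (if a.2 ≥ 2 then n + 1 else n) else n) 0
    let p : List Char := mc.foldl (fun p a => if a.1 ∈ syllable then p ++ [a.1] else p) []
    let m : Int := if p.length ≥ 2 then (0 : Int) + 1 else 0
    if n ≥ 1 ∨ m ≥ 1 then v ++ [i] else v) []
  (v.length : Int)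

-- ===== PORT B =====
def complex_word_count_alt (x : List (List String)) : Int :=
  x.foldl (fun total elem =>
    let counts : List Int :=
      ['a', 'e', 'i', 'o', 'u'].map (fun vw =>
        ((elem.countP (fun word => word.toList.contains vw)) : Int))
    if counts.any (fun c => 2 ≤ c) || (counts.countP (fun c => c ≠ 0) : Int) ≥ 2
    then total + 1 else total) 0

-- ===== PRECONDITION & SPEC =====
def Spec_complex_word_count (x : List (List String)) (out : Int) : Prop := out = complex_word_count_alt x
instance (x : List (List String)) (out : Int) : Decidable (Spec_complex_word_count x out) := by unfold Spec_complex_word_count; infer_instance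

-- ===== CLAIM (what is proved, stated in full; the proofs are below) =====
def Claim_equal_complex_word_count : Prop := ∀ (x : List (List String)), Dom_complex_word_count x → Spec_complex_word_count x (complex_word_count x)

-- ===== LEMMAS AND PROOFS =====

def cwcV : List Char := ['a', 'e', 'i', 'o', 'u']

def cwcL (e : List String) : List Char := (e.map (fun w => PySem.Set.ofList w.toList)).flatten

def cwcCond (e : List String) : Bool :=
  cwcV.any (fun vw => decide (2 ≤ (cwcL e).count vw)) ||
  decide (2 ≤ cwcV.countP (fun vw => decide (vw ∈ cwcL e)))

lemma cwc_dict (e : List String) :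
    e.foldl (fun c word => (PySem.Set.ofList word.toList).foldl
        (fun c ch => c.modify ch 0 (· + 1)) c) PySem.Dict.empty
      = PySem.Dict.counter (cwcL e) := by
  rw [PySem.Dict.counter_eq_foldl, cwcL, List.foldl_flatten, List.foldl_map]

lemma cwc_count (e : List String) (vw : Char) :
    (cwcL e).count vw = e.countP (fun w => w.toList.contains vw) := by
  induction e with
  | nil => simp [cwcL]
  | cons w e ih =>
    have h1 : cwcL (w :: e) = PySem.Set.ofList w.toList ++ cwcL e := by
      simp [cwcL]
    rw [h1, List.count_append, ih, List.countP_cons,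
      (PySem.Set.nodup_ofList w.toList).count]
    by_cases h : vw ∈ w.toList <;>
      simp [PySem.Set.mem_ofList, h, Nat.add_comm]

-- number of distinct vowels present in L, two ways
lemma cwc_distinct (L : List Char) :
    List.countP (fun k => decide (k ∈ cwcV)) (PySem.Set.ofList L)
      = cwcV.countP (fun vw => decide (vw ∈ L)) := by
  rw [List.countP_eq_length_filter, List.countP_eq_length_filter]
  have hn1 : ((PySem.Set.ofList L).filter (fun k => decide (k ∈ cwcV))).Nodup :=
    (PySem.Set.nodup_ofList L).filter _
  have hn2 : (cwcV.filter (fun vw => decide (vw ∈ L))).Nodup := by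
    have : cwcV.Nodup := by decide
    exact this.filter _
  have hfs : ((PySem.Set.ofList L).filter (fun k => decide (k ∈ cwcV))).toFinset
      = (cwcV.filter (fun vw => decide (vw ∈ L))).toFinset := by
    ext c
    simp [PySem.Set.mem_ofList, And.comm]
  exact (List.perm_of_nodup_nodup_toFinset_eq hn1 hn2 hfs).length_eq

lemma cwc_c1 (L : List Char) :
    0 < List.countP ((fun (a : Char × Int) => decide (a.1 ∈ cwcV) && decide (2 ≤ a.2)) ∘
        fun k => (k, (List.count k L : Int))) (PySem.Set.ofList L)
      ↔ ∃ vw ∈ cwcV, 2 ≤ L.count vw := by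
  rw [List.countP_pos_iff]
  constructor
  · rintro ⟨k, hk, hpk⟩
    simp only [Function.comp_apply, Bool.and_eq_true, decide_eq_true_eq] at hpk
    exact ⟨k, hpk.1, by exact_mod_cast hpk.2⟩
  · rintro ⟨vw, hv, hc⟩
    refine ⟨vw, (PySem.Set.mem_ofList L vw).mpr (List.count_pos_iff.mp (by omega)), ?_⟩
    simp only [Function.comp_apply, Bool.and_eq_true, decide_eq_true_eq]
    exact ⟨hv, by exact_mod_cast hc⟩

lemma cwc_condA (e : List String) :
    ((PySem.List.sorted
        (e.foldl (fun c word => (PySem.Set.ofList word.toList).foldl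
            (fun c ch => c.modify ch 0 (· + 1)) c) (PySem.Dict.empty : PySem.Dict Char Int)).items
        (fun a => a.2) true).foldl
          (fun n a => if a.1 ∈ ['a','e','i','o','u'] then (if a.2 ≥ 2 then n + 1 else n) else n)
          (0 : Int) ≥ 1
      ∨ (if ((PySem.List.sorted
        (e.foldl (fun c word => (PySem.Set.ofList word.toList).foldl
            (fun c ch => c.modify ch 0 (· + 1)) c) (PySem.Dict.empty : PySem.Dict Char Int)).items
        (fun a => a.2) true).foldl
          (fun p a => if a.1 ∈ ['a','e','i','o','u'] then p ++ [a.1] else p) ([] : List Char)).length ≥ 2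
        then (0 : Int) + 1 else 0) ≥ 1)
    ↔ cwcCond e = true := by
  simp only [cwc_dict]
  have hV : (['a','e','i','o','u'] : List Char) = cwcV := rfl
  rw [hV]
  have hfn : (fun (n : Int) (a : Char × Int) =>
        if a.1 ∈ cwcV then (if a.2 ≥ 2 then n + 1 else n) else n)
      = fun n a => if (decide (a.1 ∈ cwcV) && decide (2 ≤ a.2)) = true then n + 1 else n := by
    funext n a
    by_cases h1 : a.1 ∈ cwcV <;> by_cases h2 : (2 : Int) ≤ a.2 <;>
      simp [h1, h2, ge_iff_le]
  have hfp : (fun (p : List Char) (a : Char × Int) =>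
        if a.1 ∈ cwcV then p ++ [a.1] else p)
      = fun p a => if (decide (a.1 ∈ cwcV)) = true then p ++ [(fun (a : Char × Int) => a.1) a] else p := by
    funext p a
    by_cases h1 : a.1 ∈ cwcV <;> simp [h1]
  rw [hfn, hfp, PySem.List.foldl_count_if, PySem.List.foldl_append_if]
  rw [(PySem.List.sorted_perm _ _ _).countP_eq, PySem.Dict.items_counter, List.countP_map]
  rw [List.nil_append]
  have hlen : (List.map (fun (a : Char × Int) => a.1)
        (List.filter (fun a => decide (a.1 ∈ cwcV))
          (PySem.List.sorted
            (List.map (fun k => (k, (List.count k (cwcL e) : Int))) (PySem.Set.ofList (cwcL e)))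
            (fun a => a.2) true))).length
      = cwcV.countP (fun vw => decide (vw ∈ cwcL e)) := by
    rw [List.length_map, ← List.countP_eq_length_filter,
      (PySem.List.sorted_perm _ _ _).countP_eq, List.countP_map,
      ← cwc_distinct]
    rfl
  rw [hlen]
  by_cases h2 : 2 ≤ List.countP (fun vw => decide (vw ∈ cwcL e)) cwcV
  · rw [if_pos (by exact h2)]
    constructor
    · intro _
      simp only [cwcCond, Bool.or_eq_true, List.any_eq_true, decide_eq_true_eq]
      exact Or.inr h2
    · intro _
      right
      norm_num
  · rw [if_neg (by exact h2)]
    simp only [cwcCond, Bool.or_eq_true, List.any_eq_true, decide_eq_true_eq]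
    constructor
    · rintro (h | h)
      · have hpos : 0 < List.countP
            ((fun (a : Char × Int) => decide (a.1 ∈ cwcV) && decide (2 ≤ a.2)) ∘
              fun k => (k, (List.count k (cwcL e) : Int))) (PySem.Set.ofList (cwcL e)) := by
          omega
        exact Or.inl ((cwc_c1 (cwcL e)).mp hpos)
      · exact absurd h (by norm_num)
    · rintro (h | h)
      · have hpos := (cwc_c1 (cwcL e)).mpr h
        left
        omega
      · exact absurd h h2

lemma cwc_condB (e : List String) :
    (((List.map (fun vw => ((List.countP (fun word => word.toList.contains vw) e : Nat) : Int))
          ['a','e','i','o','u']).any fun c => decide (2 ≤ c))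
      || decide (((List.countP (fun c => decide (c ≠ 0))
            (List.map (fun vw => ((List.countP (fun word => word.toList.contains vw) e : Nat) : Int))
              ['a','e','i','o','u']) : Nat) : Int) ≥ 2))
    = cwcCond e := by
  have hmap : List.map (fun vw => ((List.countP (fun word => word.toList.contains vw) e : Nat) : Int))
        ['a','e','i','o','u']
      = List.map (fun vw => ((List.count vw (cwcL e) : Nat) : Int)) cwcV := by
    apply List.map_congr_left
    intro vw _
    rw [cwc_count]
  rw [hmap]
  rw [List.any_map, List.countP_map]
  have hcc : List.countP ((fun c => decide (c ≠ 0)) ∘ fun vw => ((List.count vw (cwcL e) : Nat) : Int)) cwcV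
      = List.countP (fun vw => decide (vw ∈ cwcL e)) cwcV := by
    apply List.countP_congr
    intro vw _
    simp only [Function.comp_apply, decide_eq_true_eq]
    rw [← List.count_pos_iff]
    omega
  rw [hcc]
  simp only [cwcCond]
  refine congrArg₂ (· || ·) ?_ ?_
  · refine List.any_congr rfl ?_
    intro vw
    simp only [Function.comp_apply, decide_eq_decide]
    exact ⟨fun h => by exact_mod_cast h, fun h => by exact_mod_cast h⟩
  · simp only [ge_iff_le, decide_eq_decide]
    exact ⟨fun h => by exact_mod_cast h, fun h => by exact_mod_cast h⟩

def cwcCondB (elem : List String) : Bool :=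
  let counts : List Int := ['a','e','i','o','u'].map (fun vw =>
    ((elem.countP (fun word => word.toList.contains vw)) : Int))
  counts.any (fun c => 2 ≤ c) || (counts.countP (fun c => c ≠ 0) : Int) ≥ 2

lemma cwc_B_fold (x : List (List String)) (t : Int) :
    x.foldl (fun total elem =>
      let counts : List Int := ['a','e','i','o','u'].map (fun vw =>
        ((elem.countP (fun word => word.toList.contains vw)) : Int))
      if (counts.any (fun c => 2 ≤ c) || (counts.countP (fun c => c ≠ 0) : Int) ≥ 2)
      then total + 1 else total) t
    = t + ((x.countP cwcCond : Nat) : Int) := by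
  induction x generalizing t with
  | nil => simp
  | cons e x ih =>
    rw [List.foldl_cons, ih]
    simp only [cwc_condB, List.countP_cons]
    by_cases h : cwcCond e
    · rw [if_pos h]
      simp [h]
      ring
    · rw [if_neg (by simp [h])]
      simp [h]

lemma cwc_B_eq (x : List (List String)) :
    complex_word_count_alt x = ((x.countP cwcCond : Nat) : Int) := by
  have := cwc_B_fold x 0
  rw [zero_add] at this
  exact this

lemma cwc_A_fold (x : List (List String)) (v : List (List String)) :
    ((x.foldl (fun v i =>
      let words := i
      let c : PySem.Dict Char Int := words.foldl
        (fun c word => (PySem.Set.ofList word.toList).foldl (fun c ch => c.modify ch 0 (· + 1)) c)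
        PySem.Dict.empty
      let mc := PySem.List.sorted c.items (fun a => a.2) true
      let n : Int := mc.foldl (fun n a =>
        if a.1 ∈ ['a','e','i','o','u'] then (if a.2 ≥ 2 then n + 1 else n) else n) 0
      let p : List Char := mc.foldl (fun p a => if a.1 ∈ ['a','e','i','o','u'] then p ++ [a.1] else p) []
      let m : Int := if p.length ≥ 2 then (0 : Int) + 1 else 0
      if n ≥ 1 ∨ m ≥ 1 then v ++ [i] else v) v).length : Int)
    = (v.length : Int) + ((x.countP cwcCond : Nat) : Int) := by
  induction x generalizing v with
  | nil => simp
  | cons e x ih =>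
    rw [List.foldl_cons, ih]
    simp only [List.countP_cons]
    have hiff := cwc_condA e
    by_cases hc : cwcCond e
    · rw [if_pos (hiff.mpr hc)]
      simp [hc]
      ring
    · rw [if_neg (fun hC => hc (hiff.mp hC))]
      simp [hc]

lemma cwc_A_eq (x : List (List String)) :
    complex_word_count x = ((x.countP cwcCond : Nat) : Int) := by
  have h := cwc_A_fold x []
  simp only [List.length_nil, Nat.cast_zero, zero_add] at h
  exact h


-- ===== VERDICT (by name: the statement is the Claim_ definition above) =====
theorem complex_word_count_spec : Claim_equal_complex_word_count := by
  intro x _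
  unfold Spec_complex_word_count
  rw [cwc_A_eq, cwc_B_eq]
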